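-- pv_equiv track=rewrite | github.com/A-Arnob79/CSE221_Algorithms | LAB - 03/LAB - 03_B.py | pair_max
-- ===== SOURCE A (Python) =====
-- def pair_max(A, left, right):
--   if len(A) == 1: return A[0]
--
--   mid = len(A)// 2
--   leftS = A[:mid]
--   rightS= A[mid:]
--
--   leftR = pair_max(leftS, leftS[:mid], leftS[mid:])
--   rightR = pair_max(rightS, rightS[:mid], rightS[mid:])
--
--   max_left_val = max(leftS)
--   max_right_val = max(max(rightS)**2, min(rightS)**2)
--   req_val = max_left_val + max_right_val
--
--   return max(leftR, rightR, req_val)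
-- ===== SOURCE B (Python) =====
-- def pair_max(A, left, right):
--     # One bottom-up pass: each split node returns (answer, max, min) of its range,
--     # so the range max/min never have to be rescanned.
--     def go(a):
--         if len(a) == 1:
--             x = a[0]
--             return x, x, x
--         m = len(a) // 2
--         rl, mxl, mnl = go(a[:m])
--         rr, mxr, mnr = go(a[m:])
--         req = mxl + max(mxr * mxr, mnr * mnr)
--         return max(rl, rr, req), max(mxl, mxr), min(mnl, mnr)
--     return go(A)[0]
-- ===== Notes on version B (the rewrite author's own statement) =====
-- stated objective: faster
-- what changed: B makes each recursive node return (answer, range max, range min) in one bottom-up pass instead of rescanning the halves with max()/min() at every node.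
import Mathlib
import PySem

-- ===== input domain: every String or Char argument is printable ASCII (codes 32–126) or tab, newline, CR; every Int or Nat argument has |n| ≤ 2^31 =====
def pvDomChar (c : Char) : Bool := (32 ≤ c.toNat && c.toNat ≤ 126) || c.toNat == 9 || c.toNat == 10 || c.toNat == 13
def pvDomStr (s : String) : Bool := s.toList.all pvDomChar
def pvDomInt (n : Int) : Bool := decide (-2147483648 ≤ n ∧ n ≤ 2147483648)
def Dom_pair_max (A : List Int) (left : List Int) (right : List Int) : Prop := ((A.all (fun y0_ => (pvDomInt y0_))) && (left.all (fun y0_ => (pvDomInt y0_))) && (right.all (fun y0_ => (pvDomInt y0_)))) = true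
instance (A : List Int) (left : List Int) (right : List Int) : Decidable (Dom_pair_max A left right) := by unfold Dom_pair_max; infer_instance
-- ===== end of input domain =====

-- B replaces A's per-node max()/min() rescans by one bottom-up pass returning (answer, max, min) per node: O(n) instead of O(n log n).
-- Python's left/right parameters are never read by the body; the ports keep them as unused parameters.

-- ===== PORT A =====
-- Python max(l) / min(l) on a nonempty int list (value on [] is irrelevant: never called there)
def pyMax (l : List Int) : Int := match l with | [] => 0 | x :: xs => xs.foldl max x
def pyMin (l : List Int) : Int := match l with | [] => 0 | x :: xs => xs.foldl min x

-- fuel (= list length at the top call) only makes the recursion structural; it never runs out on Pre_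
def pairMaxF : Nat → List Int → List Int → List Int → Int
  | 0, _, _, _ => 0
  | f + 1, A, _, _ =>
    if A.length = 1 then A.headD 0
    else if A.length = 0 then 0  -- Python diverges here (infinite recursion); excluded by Pre_
    else
      let mid := A.length / 2
      let leftS := A.take mid
      let rightS := A.drop mid
      let leftR := pairMaxF f leftS (leftS.take mid) (leftS.drop mid)
      let rightR := pairMaxF f rightS (rightS.take mid) (rightS.drop mid)
      let max_left_val := pyMax leftS
      let max_right_val := max ((pyMax rightS) ^ 2) ((pyMin rightS) ^ 2)
      let req_val := max_left_val + max_right_val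
      max leftR (max rightR req_val)

def pair_max (A : List Int) (left : List Int) (right : List Int) : Int :=
  pairMaxF A.length A left right

-- ===== PORT B =====
-- go a = (answer, range max, range min); one pass, nothing rescanned; same fuel guard
def pmGoF : Nat → List Int → Int × Int × Int
  | 0, a => (a.headD 0, a.headD 0, a.headD 0)
  | f + 1, a =>
    if a.length ≤ 1 then
      let x := a.headD 0
      (x, x, x)
    else
      let m := a.length / 2
      let tl := pmGoF f (a.take m)
      let tr := pmGoF f (a.drop m)
      let rl := tl.1; let mxl := tl.2.1; let mnl := tl.2.2
      let rr := tr.1; let mxr := tr.2.1; let mnr := tr.2.2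
      let req := mxl + max (mxr * mxr) (mnr * mnr)
      (max rl (max rr req), max mxl mxr, min mnl mnr)

def pair_max_alt (A : List Int) (left : List Int) (right : List Int) : Int :=
  (pmGoF A.length A).1

-- ===== PRECONDITION & SPEC =====
-- Pre_ excludes only A = [], on which Python A recurses forever (RecursionError).
def Pre_pair_max (A : List Int) (left : List Int) (right : List Int) : Prop := A ≠ []
instance (A : List Int) (left : List Int) (right : List Int) : Decidable (Pre_pair_max A left right) := by unfold Pre_pair_max; infer_instance
def pvWitness_pair_max : List Int × List Int × List Int := ([3, -5, 2, 7], [3, -5], [2, 7])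

def Spec_pair_max (A : List Int) (left : List Int) (right : List Int) (out : Int) : Prop := out = pair_max_alt A left right
instance (A : List Int) (left : List Int) (right : List Int) (out : Int) : Decidable (Spec_pair_max A left right out) := by unfold Spec_pair_max; infer_instance

-- ===== CLAIM =====
def Claim_equal_pair_max : Prop := ∀ (A : List Int) (left : List Int) (right : List Int), Dom_pair_max A left right → Pre_pair_max A left right → Spec_pair_max A left right (pair_max A left right)

-- ===== LEMMAS AND PROOFS =====
theorem foldl_max_shift (l : List Int) (a b : Int) :
    l.foldl max (max a b) = max a (l.foldl max b) := by
  induction l generalizing b with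
  | nil => rfl
  | cons c l ih =>
    simp only [List.foldl_cons]
    rw [max_assoc, ih]

theorem foldl_min_shift (l : List Int) (a b : Int) :
    l.foldl min (min a b) = min a (l.foldl min b) := by
  induction l generalizing b with
  | nil => rfl
  | cons c l ih =>
    simp only [List.foldl_cons]
    rw [min_assoc, ih]

theorem pyMax_append (xs ys : List Int) (hx : xs ≠ []) (hy : ys ≠ []) :
    pyMax (xs ++ ys) = max (pyMax xs) (pyMax ys) := by
  match xs, ys with
  | x :: xs, y :: ys =>
    simp only [pyMax, List.cons_append, List.foldl_append, List.foldl_cons]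
    rw [foldl_max_shift ys (xs.foldl max x) y]

theorem pyMin_append (xs ys : List Int) (hx : xs ≠ []) (hy : ys ≠ []) :
    pyMin (xs ++ ys) = min (pyMin xs) (pyMin ys) := by
  match xs, ys with
  | x :: xs, y :: ys =>
    simp only [pyMin, List.cons_append, List.foldl_append, List.foldl_cons]
    rw [foldl_min_shift ys (xs.foldl min x) y]

theorem pmGoF_spec (f : ℕ) : ∀ (A : List Int), A.length ≤ f → A ≠ [] →
    ∀ (l r : List Int), pmGoF f A = (pairMaxF f A l r, pyMax A, pyMin A) := by
  induction f with
  | zero => intro A hA hne; cases A <;> simp_all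
  | succ f ih =>
    intro A hA hne l r
    rw [pmGoF, pairMaxF]
    by_cases h1 : A.length = 1
    · match A, h1 with
      | [x], _ => simp [pyMax, pyMin]
    · have hlen : 2 ≤ A.length := by
        cases A with
        | nil => exact absurd rfl hne
        | cons a as => simp only [List.length_cons] at h1 ⊢; omega
      have h0 : ¬ A.length ≤ 1 := by omega
      have htne : A.take (A.length / 2) ≠ [] := by
        intro h
        have := congrArg List.length h
        simp only [List.length_take, List.length_nil] at this
        omega
      have hdne : A.drop (A.length / 2) ≠ [] := by
        intro h
        have := congrArg List.length h
        simp only [List.length_drop, List.length_nil] at this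
        omega
      have htlen : (A.take (A.length / 2)).length ≤ f := by
        simp only [List.length_take]; omega
      have hdlen : (A.drop (A.length / 2)).length ≤ f := by
        simp only [List.length_drop]; omega
      simp only [h1, h0, if_false]
      have hA0 : A.length ≠ 0 := by omega
      simp only [hA0, if_false]
      rw [ih _ htlen htne ((A.take (A.length / 2)).take (A.length / 2)) ((A.take (A.length / 2)).drop (A.length / 2)),
          ih _ hdlen hdne ((A.drop (A.length / 2)).take (A.length / 2)) ((A.drop (A.length / 2)).drop (A.length / 2))]
      have hsplit : A = A.take (A.length / 2) ++ A.drop (A.length / 2) := (List.take_append_drop _ _).symm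
      dsimp only
      rw [Prod.mk.injEq, Prod.mk.injEq, pow_two, pow_two]
      refine ⟨rfl, ?_, ?_⟩
      · conv_rhs => rw [hsplit]
        rw [pyMax_append _ _ htne hdne]
      · conv_rhs => rw [hsplit]
        rw [pyMin_append _ _ htne hdne]

-- ===== VERDICT =====
theorem pair_max_spec : Claim_equal_pair_max := by
  intro A l r _hd hpre
  unfold Spec_pair_max pair_max_alt pair_max
  rw [pmGoF_spec A.length A le_rfl hpre l r]
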